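-- pv_equiv track=rewrite | github.com/kacpercwiertnia/introduction_to_computer_science_course | Zbiór2/Zadanie5.py | generuj_liczbe
-- ===== SOURCE A (Python) =====
-- def generuj_liczbe(n, i):
--   nowa_tmp = 0
--   while n > 0:
--     if i % 2 == 1:
--       nowa_tmp *= 10
--       nowa_tmp += n % 10
--     i //= 2
--     n //= 10
--
--   nowa = 0
--   while nowa_tmp > 0:
--     nowa *= 10
--     nowa += nowa_tmp % 10
--     nowa_tmp //= 10
--
--   return nowa
-- ===== SOURCE B (Python) =====
-- def generuj_liczbe(n, i):
--     nowa = 0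
--     p = 1
--     while n > 0:
--         if i % 2 == 1:
--             nowa += (n % 10) * p
--             p *= 10
--         i //= 2
--         n //= 10
--     return nowa
-- ===== Notes on version B (the rewrite author's own statement) =====
-- stated objective: simpler
-- what changed: Single pass with a growing place-value multiplier builds the result directly in correct digit order, replacing A's two-loop pack-then-reverse scheme.
-- intended difference: On inputs where the lowest selected digit of n is 0 but some selected digit is nonzero (e.g. n=10, i=3), A's reverse step silently drops those low zero digits and returns 1, while B returns 10, the number actually formed by the selected digits in order, which is the intended value. — e.g. on generuj_liczbe(10, 3): A returns 1, B returns 10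
import Mathlib
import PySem

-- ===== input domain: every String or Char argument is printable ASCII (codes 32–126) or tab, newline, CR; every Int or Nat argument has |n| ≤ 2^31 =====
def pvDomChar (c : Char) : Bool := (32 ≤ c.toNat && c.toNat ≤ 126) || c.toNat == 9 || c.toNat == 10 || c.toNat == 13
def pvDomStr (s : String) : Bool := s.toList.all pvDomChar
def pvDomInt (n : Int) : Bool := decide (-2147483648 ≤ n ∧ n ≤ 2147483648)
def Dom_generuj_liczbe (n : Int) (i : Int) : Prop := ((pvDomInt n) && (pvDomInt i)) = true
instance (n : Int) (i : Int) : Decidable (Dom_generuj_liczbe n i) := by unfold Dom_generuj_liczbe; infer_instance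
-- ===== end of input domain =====

-- B builds the result in one pass with a place-value multiplier instead of A's pack-then-reverse
-- two-loop scheme (objective: simpler); where A's reverse step drops low selected zero digits,
-- B returns the number actually formed by the selected digits (see D_ below).

-- termination helper shared by the loop ports (n//10 shrinks a positive n)
theorem pvFloordivTenLt {n : Int} (h : n > 0) : (PySem.Int.floordiv n 10).toNat < n.toNat := by
  rw [PySem.Int.floordiv_eq_ediv_of_pos (by norm_num)]
  omega

-- ===== PORT A =====
-- first while loop: pack the selected digits (LSB of n first) into nowa_tmp
def pvLoop1 (n i nowa_tmp : Int) : Int :=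
  if h : n > 0 then
    pvLoop1 (PySem.Int.floordiv n 10) (PySem.Int.floordiv i 2)
      (if PySem.Int.mod i 2 = 1 then nowa_tmp * 10 + PySem.Int.mod n 10 else nowa_tmp)
  else nowa_tmp
termination_by n.toNat
decreasing_by exact pvFloordivTenLt h

-- second while loop: reverse the digits of nowa_tmp into nowa
def pvLoop2 (nowa_tmp nowa : Int) : Int :=
  if h : nowa_tmp > 0 then
    pvLoop2 (PySem.Int.floordiv nowa_tmp 10) (nowa * 10 + PySem.Int.mod nowa_tmp 10)
  else nowa
termination_by nowa_tmp.toNat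
decreasing_by exact pvFloordivTenLt h

def generuj_liczbe (n : Int) (i : Int) : Int := pvLoop2 (pvLoop1 n i 0) 0

-- ===== PORT B =====
-- single loop: add each selected digit at its place value p, growing p only on selection
def pvLoopB (n i p nowa : Int) : Int :=
  if h : n > 0 then
    pvLoopB (PySem.Int.floordiv n 10) (PySem.Int.floordiv i 2)
      (if PySem.Int.mod i 2 = 1 then p * 10 else p)
      (if PySem.Int.mod i 2 = 1 then nowa + PySem.Int.mod n 10 * p else nowa)
  else nowa
termination_by n.toNat
decreasing_by exact pvFloordivTenLt h

def generuj_liczbe_alt (n : Int) (i : Int) : Int := pvLoopB n i 1 0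

-- ===== PRECONDITION & SPEC =====
-- closed-form positional view of the input: digit j of n and bit j of i
-- (Int `/` and `%` coincide with Python's // and % here since the divisors are positive)
def pvSel (n i : Int) (j : Nat) : Prop := 10 ^ j ≤ n ∧ (i / 2 ^ j) % 2 = 1
def pvDigit (n : Int) (j : Nat) : Int := (n / 10 ^ j) % 10

-- On inputs where the lowest selected digit of n is 0 but some selected digit is nonzero
-- (e.g. n=10, i=3), A's reverse step silently drops those low zero digits and returns 1,
-- while B returns 10, the number actually formed by the selected digits in order, which is
-- the intended value.  (The bound j < 11 is harmless: inside Dom, n < 10^10.)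
def D_generuj_liczbe (n : Int) (i : Int) : Prop :=
  (∃ j < 11, pvSel n i j ∧ (∀ j' < j, ¬ pvSel n i j') ∧ pvDigit n j = 0) ∧
  (∃ k < 11, pvSel n i k ∧ pvDigit n k ≠ 0)
instance (n : Int) (i : Int) : Decidable (D_generuj_liczbe n i) := by
  unfold D_generuj_liczbe pvSel pvDigit; infer_instance

def Spec_generuj_liczbe (n : Int) (i : Int) (out : Int) : Prop :=
  ¬ D_generuj_liczbe n i → out = generuj_liczbe_alt n i
instance (n : Int) (i : Int) (out : Int) : Decidable (Spec_generuj_liczbe n i out) := by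
  unfold Spec_generuj_liczbe; infer_instance

def pvDiffWitness_generuj_liczbe : Int × Int := (10, 3)
def pvDiffWitnessOut_generuj_liczbe : Int × Int := (1, 10)

-- ===== CLAIM (what is proved, stated in full; the proofs are below) =====
def Claim_unchanged_generuj_liczbe : Prop := ∀ (n : Int) (i : Int), Dom_generuj_liczbe n i → Spec_generuj_liczbe n i (generuj_liczbe n i)
def Claim_changed_generuj_liczbe : Prop := Dom_generuj_liczbe (pvDiffWitness_generuj_liczbe.1) (pvDiffWitness_generuj_liczbe.2) ∧ D_generuj_liczbe (pvDiffWitness_generuj_liczbe.1) (pvDiffWitness_generuj_liczbe.2) ∧ generuj_liczbe (pvDiffWitness_generuj_liczbe.1) (pvDiffWitness_generuj_liczbe.2) = pvDiffWitnessOut_generuj_liczbe.1 ∧ generuj_liczbe_alt (pvDiffWitness_generuj_liczbe.1) (pvDiffWitness_generuj_liczbe.2) = pvDiffWitnessOut_generuj_liczbe.2 ∧ pvDiffWitnessOut_generuj_liczbe.1 ≠ pvDiffWitnessOut_generuj_liczbe.2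
def Claim_exact_generuj_liczbe : Prop := ∀ (n : Int) (i : Int), Dom_generuj_liczbe n i → D_generuj_liczbe n i → generuj_liczbe n i ≠ generuj_liczbe_alt n i

-- ===== LEMMAS AND PROOFS =====

-- the digits of n selected by the bitmask i, least-significant first (proof-side view)
def pvSelDigits (n i : Int) : List Int :=
  if h : n > 0 then
    (if PySem.Int.mod i 2 = 1 then [PySem.Int.mod n 10] else []) ++
      pvSelDigits (PySem.Int.floordiv n 10) (PySem.Int.floordiv i 2)
  else []
termination_by n.toNat
decreasing_by exact pvFloordivTenLt h

-- big-endian value of a digit list folded onto accumulator t (the shape of A's first loop)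
def pvValBE (L : List Int) (t : Int) : Int := L.foldl (fun a d => a * 10 + d) t
-- little-endian (place-value) value of a digit list (the shape of B's result)
def pvValLE (L : List Int) : Int := L.foldr (fun d a => d + 10 * a) 0

theorem pvLoop1_eq (n i : Int) : ∀ t, pvLoop1 n i t = pvValBE (pvSelDigits n i) t := by
  fun_induction pvSelDigits n i with
  | case1 n i h ih =>
    intro t
    rw [pvLoop1]
    simp only [dif_pos h]
    split_ifs with hs
    · rw [ih]
      simp only [pvValBE, List.singleton_append, List.foldl_cons]
    · rw [ih, List.nil_append]
  | case2 n i h =>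
    intro t
    rw [pvLoop1]
    simp only [dif_neg h, pvValBE, List.foldl_nil]

theorem pvLoopB_eq (n i : Int) : ∀ p a, pvLoopB n i p a = a + p * pvValLE (pvSelDigits n i) := by
  fun_induction pvSelDigits n i with
  | case1 n i h ih =>
    intro p a
    rw [pvLoopB]
    simp only [dif_pos h]
    split_ifs with hs
    · rw [ih]
      simp only [pvValLE, List.singleton_append, List.foldr_cons]
      ring
    · rw [ih, List.nil_append]
  | case2 n i h =>
    intro p a
    rw [pvLoopB]
    simp only [dif_neg h, pvValLE, List.foldr_nil]
    ring

theorem pvSelDigits_bounds (n i : Int) : ∀ d ∈ pvSelDigits n i, 0 ≤ d ∧ d < 10 := by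
  fun_induction pvSelDigits n i with
  | case1 n i h ih =>
    intro d hd
    rcases List.mem_append.1 hd with hd | hd
    · split_ifs at hd with hs
      · simp only [List.mem_singleton] at hd
        subst hd
        rw [PySem.Int.mod_eq_emod_of_pos (by norm_num)]
        omega
      · simp at hd
    · exact ih d hd
  | case2 n i h => simp

theorem pvValBE_ge_one (L : List Int) : ∀ t : Int, (∀ d ∈ L, 0 ≤ d) → 1 ≤ t → 1 ≤ pvValBE L t := by
  induction L with
  | nil => intro t _ ht; simpa [pvValBE] using ht
  | cons x M ih =>
    intro t hd ht
    have hx : 0 ≤ x := hd x (by simp)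
    have h1 : (1:Int) ≤ t * 10 + x := by nlinarith
    simpa [pvValBE] using ih (t * 10 + x) (fun d hdm => hd d (by simp [hdm])) h1

theorem pvValBE_pos_of_head (L : List Int) (h0 : Int) (hh : L.head? = some h0) (hne : h0 ≠ 0)
    (hd : ∀ d ∈ L, 0 ≤ d) : 1 ≤ pvValBE L 0 := by
  cases L with
  | nil => simp at hh
  | cons x M =>
    simp only [List.head?_cons, Option.some.injEq] at hh
    subst hh
    have hx : 0 ≤ x := hd x (by simp)
    have h1 : (1:Int) ≤ x := by omega
    have := pvValBE_ge_one M x (fun d hdm => hd d (by simp [hdm])) h1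
    simpa [pvValBE] using this

theorem pvValLE_append_singleton (M : List Int) (d : Int) :
    pvValLE (M ++ [d]) = pvValLE M + d * 10 ^ M.length := by
  induction M with
  | nil => simp [pvValLE]
  | cons x M ih =>
    simp only [pvValLE, List.cons_append, List.foldr_cons] at *
    rw [ih]
    simp only [List.length_cons, pow_succ]
    ring

theorem pvLoop2_zero (a : Int) : pvLoop2 0 a = a := by
  rw [pvLoop2]; norm_num

theorem pvLoop2_step (vM d a : Int) (hvM : 0 ≤ vM) (hd : 0 ≤ d) (hd10 : d < 10)
    (hpos : 0 < vM * 10 + d) :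
    pvLoop2 (vM * 10 + d) a = pvLoop2 vM (a * 10 + d) := by
  have h1 : PySem.Int.floordiv (vM * 10 + d) 10 = vM := by
    rw [PySem.Int.floordiv_eq_ediv_of_pos (by norm_num)]; omega
  have h2 : PySem.Int.mod (vM * 10 + d) 10 = d := by
    rw [PySem.Int.mod_eq_emod_of_pos (by norm_num)]; omega
  rw [pvLoop2, dif_pos hpos, h1, h2]

theorem pvLoop2_rev (L : List Int) : (∀ d ∈ L, 0 ≤ d ∧ d < 10) →
    ∀ h0, L.head? = some h0 → h0 ≠ 0 →
    ∀ a, pvLoop2 (pvValBE L 0) a = a * 10 ^ L.length + pvValLE L := by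
  induction L using List.reverseRecOn with
  | nil => intro _ h0 hh; simp at hh
  | append_singleton M d ihM =>
    intro hd h0 hh hne a
    have hdig : 0 ≤ d ∧ d < 10 := hd d (by simp)
    have hv : pvValBE (M ++ [d]) 0 = pvValBE M 0 * 10 + d := by
      simp [pvValBE, List.foldl_append]
    cases M with
    | nil =>
      have hd0 : d = h0 := by simpa using hh
      have h1 : (1:Int) ≤ d := by omega
      rw [hv]
      have hBE : pvValBE ([] : List Int) 0 = 0 := by simp [pvValBE]
      rw [hBE]
      rw [pvLoop2_step 0 d a le_rfl hdig.1 hdig.2 (by omega)]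
      rw [pvLoop2_zero]
      simp [pvValLE]
    | cons x M' =>
      have hhM : (x :: M').head? = some h0 := by simpa using hh
      have hdM : ∀ e ∈ x :: M', 0 ≤ e ∧ e < 10 := fun e he => hd e (by simp at he ⊢; tauto)
      have hvM : 1 ≤ pvValBE (x :: M') 0 :=
        pvValBE_pos_of_head _ h0 hhM hne (fun e he => (hdM e he).1)
      rw [hv]
      rw [pvLoop2_step _ d a (by omega) hdig.1 hdig.2 (by nlinarith)]
      rw [ihM hdM h0 hhM hne (a * 10 + d)]
      rw [pvValLE_append_singleton]
      simp only [List.length_append, List.length_cons, List.length_nil]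
      ring

theorem pvValBE_zero (L : List Int) (h : ∀ d ∈ L, d = 0) : pvValBE L 0 = 0 := by
  induction L with
  | nil => simp [pvValBE]
  | cons x M ih =>
    have hx : x = 0 := h x (by simp)
    subst hx
    have := ih (fun d hd => h d (by simp [hd]))
    simpa [pvValBE] using this

theorem pvValLE_zero (L : List Int) (h : ∀ d ∈ L, d = 0) : pvValLE L = 0 := by
  induction L with
  | nil => simp [pvValLE]
  | cons x M ih =>
    have hx : x = 0 := h x (by simp)
    have := ih (fun d hd => h d (by simp [hd]))
    simp [pvValLE] at this ⊢
    simp [hx, this]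

theorem pvValLE_nonneg (L : List Int) (h : ∀ d ∈ L, 0 ≤ d) : 0 ≤ pvValLE L := by
  induction L with
  | nil => simp [pvValLE]
  | cons x M ih =>
    have hx : 0 ≤ x := h x (by simp)
    have hM := ih (fun d hd => h d (by simp [hd]))
    simp only [pvValLE, List.foldr_cons] at hM ⊢
    nlinarith

theorem pvValLE_pos (L : List Int) (hd : ∀ d ∈ L, 0 ≤ d) (hne : ∃ d ∈ L, d ≠ 0) :
    1 ≤ pvValLE L := by
  induction L with
  | nil => simp at hne
  | cons x M ih =>
    have hx : 0 ≤ x := hd x (by simp)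
    have hM : 0 ≤ pvValLE M := pvValLE_nonneg M (fun d hdm => hd d (by simp [hdm]))
    rcases hne with ⟨d, hdm, hdne⟩
    rcases List.mem_cons.1 hdm with rfl | hdm
    · simp only [pvValLE, List.foldr_cons]
      have : 1 ≤ d := by omega
      simp only [pvValLE] at hM
      nlinarith
    · have h1 := ih (fun e he => hd e (by simp [he])) ⟨d, hdm, hdne⟩
      simp only [pvValLE, List.foldr_cons] at h1 ⊢
      nlinarith

theorem pvLt (L : List Int) : (∀ d ∈ L, 0 ≤ d ∧ d < 10) → L.head? = some 0 →
    (∃ d ∈ L, d ≠ 0) → pvLoop2 (pvValBE L 0) 0 < pvValLE L := by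
  induction L with
  | nil => intro _ hh; simp at hh
  | cons x M ih =>
    intro hd hh hne
    have hx : x = 0 := by simpa using hh
    subst hx
    have hdM : ∀ e ∈ M, 0 ≤ e ∧ e < 10 := fun e he => hd e (by simp [he])
    have hneM : ∃ d ∈ M, d ≠ 0 := by
      rcases hne with ⟨d, hdm, hdne⟩
      rcases List.mem_cons.1 hdm with rfl | hdm
      · exact absurd rfl hdne
      · exact ⟨d, hdm, hdne⟩
    have hM1 : 1 ≤ pvValLE M := pvValLE_pos M (fun e he => (hdM e he).1) hneM
    have hBE : pvValBE (0 :: M) 0 = pvValBE M 0 := by simp [pvValBE]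
    have hLE : pvValLE (0 :: M) = 10 * pvValLE M := by simp [pvValLE]
    rw [hBE, hLE]
    cases hhM : M.head? with
    | none =>
      have : M = [] := List.head?_eq_none_iff.1 hhM
      subst this
      simp at hneM
    | some h1 =>
      by_cases h10 : h1 = 0
      · subst h10
        have := ih hdM hhM hneM
        linarith
      · rw [pvLoop2_rev M hdM h1 hhM h10 0]
        simp only [zero_mul, zero_add]
        linarith


theorem pvSel_shift (n i : Int) (j : Nat) :
    pvSel (PySem.Int.floordiv n 10) (PySem.Int.floordiv i 2) j ↔ pvSel n i (j + 1) := by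
  rw [PySem.Int.floordiv_eq_ediv_of_pos (by norm_num),
    PySem.Int.floordiv_eq_ediv_of_pos (by norm_num)]
  unfold pvSel
  rw [Int.le_ediv_iff_mul_le (by norm_num), ← pow_succ,
    Int.ediv_ediv_of_nonneg (by norm_num), ← pow_succ']

theorem pvDigit_shift (n : Int) (j : Nat) :
    pvDigit (PySem.Int.floordiv n 10) j = pvDigit n (j + 1) := by
  rw [PySem.Int.floordiv_eq_ediv_of_pos (by norm_num)]
  unfold pvDigit
  rw [Int.ediv_ediv_of_nonneg (by norm_num), ← pow_succ']

theorem pvSel_zero (n i : Int) : pvSel n i 0 ↔ (1 ≤ n ∧ i % 2 = 1) := by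
  simp [pvSel]

theorem pvDigit_zero (n : Int) : pvDigit n 0 = n % 10 := by
  simp [pvDigit]

theorem pvSel_not_of_nonpos (n i : Int) (h : ¬ n > 0) (k : Nat) : ¬ pvSel n i k := by
  intro hc
  have h1 := hc.1
  have : (0:Int) < 10 ^ k := by positivity
  omega

theorem pvEx_iff (n i : Int) :
    (∃ d ∈ pvSelDigits n i, d ≠ 0) ↔ ∃ k : Nat, pvSel n i k ∧ pvDigit n k ≠ 0 := by
  fun_induction pvSelDigits n i with
  | case1 n i h ih =>
    have hm : PySem.Int.mod i 2 = i % 2 := PySem.Int.mod_eq_emod_of_pos (by norm_num)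
    have hmn : PySem.Int.mod n 10 = n % 10 := PySem.Int.mod_eq_emod_of_pos (by norm_num)
    have hsplit : (∃ k : Nat, pvSel n i k ∧ pvDigit n k ≠ 0) ↔
        ((pvSel n i 0 ∧ pvDigit n 0 ≠ 0) ∨ ∃ j : Nat, pvSel n i (j+1) ∧ pvDigit n (j+1) ≠ 0) := by
      constructor
      · rintro ⟨k, hk⟩
        cases k with
        | zero => exact Or.inl hk
        | succ j => exact Or.inr ⟨j, hk⟩
      · rintro (hk | ⟨j, hj⟩)
        · exact ⟨0, hk⟩
        · exact ⟨j + 1, hj⟩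
    rw [hsplit]
    split_ifs with hs
    · simp only [List.singleton_append, List.mem_cons]
      constructor
      · rintro ⟨d, (rfl | hd), hdne⟩
        · exact Or.inl ⟨(pvSel_zero n i).2 ⟨by omega, by rw [← hm]; exact hs⟩, by
            rw [pvDigit_zero, ← hmn]; exact hdne⟩
        · rcases (ih.1 ⟨d, hd, hdne⟩) with ⟨j, hj1, hj2⟩
          exact Or.inr ⟨j, (pvSel_shift n i j).1 hj1, by rw [← pvDigit_shift]; exact hj2⟩
      · rintro (⟨_, hd0⟩ | ⟨j, hj1, hj2⟩)
        · exact ⟨PySem.Int.mod n 10, Or.inl rfl, by rw [hmn, ← pvDigit_zero]; exact hd0⟩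
        · rcases ih.2 ⟨j, (pvSel_shift n i j).2 hj1, by rw [pvDigit_shift]; exact hj2⟩
            with ⟨d, hd, hdne⟩
          exact ⟨d, Or.inr hd, hdne⟩
    · simp only [List.nil_append]
      rw [ih]
      constructor
      · rintro ⟨j, hj1, hj2⟩
        exact Or.inr ⟨j, (pvSel_shift n i j).1 hj1, by rw [← pvDigit_shift]; exact hj2⟩
      · rintro (⟨hk, hd0⟩ | ⟨j, hj1, hj2⟩)
        · exact absurd ((pvSel_zero n i).1 hk).2 (by rw [← hm]; exact hs)
        · exact ⟨j, (pvSel_shift n i j).2 hj1, by rw [pvDigit_shift]; exact hj2⟩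
  | case2 n i h =>
    simp only [List.not_mem_nil, false_and, exists_false, false_iff, not_exists]
    intro k hk
    exact pvSel_not_of_nonpos n i h k hk.1

theorem pvHead_iff (n i : Int) : ∀ d : Int, (pvSelDigits n i).head? = some d ↔
    ∃ j : Nat, pvSel n i j ∧ (∀ j' < j, ¬ pvSel n i j') ∧ pvDigit n j = d := by
  fun_induction pvSelDigits n i with
  | case1 n i h ih =>
    intro d
    have hm : PySem.Int.mod i 2 = i % 2 := PySem.Int.mod_eq_emod_of_pos (by norm_num)
    have hmn : PySem.Int.mod n 10 = n % 10 := PySem.Int.mod_eq_emod_of_pos (by norm_num)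
    split_ifs with hs
    · have hsel0 : pvSel n i 0 := (pvSel_zero n i).2 ⟨by omega, by rw [← hm]; exact hs⟩
      simp only [List.singleton_append, List.head?_cons, Option.some.injEq]
      constructor
      · rintro rfl
        exact ⟨0, hsel0, fun j' hj' => absurd hj' (Nat.not_lt_zero _),
          by rw [pvDigit_zero, hmn]⟩
      · rintro ⟨j, hj1, hj2, hj3⟩
        cases j with
        | zero => rw [← hj3, pvDigit_zero, hmn]
        | succ j => exact absurd hsel0 (hj2 0 (Nat.succ_pos j))
    · have hnsel0 : ¬ pvSel n i 0 := fun hc =>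
        absurd ((pvSel_zero n i).1 hc).2 (by rw [← hm]; exact hs)
      rw [List.nil_append, ih d]
      constructor
      · rintro ⟨j, hj1, hj2, hj3⟩
        refine ⟨j + 1, (pvSel_shift n i j).1 hj1, ?_, by rw [← pvDigit_shift]; exact hj3⟩
        intro j' hj'
        cases j' with
        | zero => exact hnsel0
        | succ m => exact fun hc => hj2 m (by omega) ((pvSel_shift n i m).2 hc)
      · rintro ⟨j, hj1, hj2, hj3⟩
        cases j with
        | zero => exact absurd hj1 hnsel0
        | succ m =>
          refine ⟨m, (pvSel_shift n i m).2 hj1, ?_, by rw [pvDigit_shift]; exact hj3⟩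
          intro j' hj' hc
          exact hj2 (j' + 1) (by omega) ((pvSel_shift n i j').1 hc)
  | case2 n i h =>
    intro d
    simp only [List.head?_nil]
    constructor
    · intro hc
      exact absurd hc (by simp)
    · rintro ⟨j, hj1, -, -⟩
      exact absurd hj1 (pvSel_not_of_nonpos n i h j)

theorem pvSel_lt (n i : Int) (hn : n ≤ 2147483648) {j : Nat} (hs : pvSel n i j) : j < 11 := by
  by_contra hj
  have h1 : (10:Int) ^ 11 ≤ 10 ^ j := pow_le_pow_right₀ (by norm_num) (by omega)
  have h2 := hs.1
  norm_num at h1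
  omega

theorem pvD_iff (n i : Int) (hn : n ≤ 2147483648) :
    D_generuj_liczbe n i ↔
      ((pvSelDigits n i).head? = some 0 ∧ ∃ d ∈ pvSelDigits n i, d ≠ 0) := by
  unfold D_generuj_liczbe
  rw [pvHead_iff n i 0, pvEx_iff n i]
  constructor
  · rintro ⟨⟨j, -, hj⟩, ⟨k, -, hk⟩⟩
    exact ⟨⟨j, hj⟩, ⟨k, hk⟩⟩
  · rintro ⟨⟨j, hj⟩, ⟨k, hk⟩⟩
    exact ⟨⟨j, pvSel_lt n i hn hj.1, hj⟩, ⟨k, pvSel_lt n i hn hk.1, hk⟩⟩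

theorem pvMainEq (n i : Int) (hD : ¬ ((pvSelDigits n i).head? = some 0 ∧ ∃ d ∈ pvSelDigits n i, d ≠ 0)) :
    generuj_liczbe n i = generuj_liczbe_alt n i := by
  unfold generuj_liczbe generuj_liczbe_alt
  rw [pvLoop1_eq, pvLoopB_eq]
  have hdig := pvSelDigits_bounds n i
  cases hh : (pvSelDigits n i).head? with
  | none =>
    have h0 : pvSelDigits n i = [] := List.head?_eq_none_iff.1 hh
    rw [h0]
    simp [pvValBE, pvValLE, pvLoop2_zero]
  | some h0 =>
    by_cases h00 : h0 = 0
    · subst h00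
      have hall : ∀ d ∈ pvSelDigits n i, d = 0 := by
        intro d hd
        by_contra hne
        exact hD ⟨hh, ⟨d, hd, hne⟩⟩
      rw [pvValBE_zero _ hall, pvValLE_zero _ hall, pvLoop2_zero]
      ring
    · rw [pvLoop2_rev _ hdig h0 hh h00 0]
      ring

theorem pvMainNe (n i : Int) (hD : (pvSelDigits n i).head? = some 0 ∧ ∃ d ∈ pvSelDigits n i, d ≠ 0) :
    generuj_liczbe n i ≠ generuj_liczbe_alt n i := by
  obtain ⟨hh, hex⟩ := hD
  unfold generuj_liczbe generuj_liczbe_alt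
  rw [pvLoop1_eq, pvLoopB_eq]
  have hlt := pvLt (pvSelDigits n i) (pvSelDigits_bounds n i) hh hex
  intro heq
  rw [heq] at hlt
  linarith

-- witness computations for the changed-claim
theorem hsel : pvSelDigits 10 3 = [0, 1] := by
  have m1 : PySem.Int.mod 3 2 = 1 := by
    rw [PySem.Int.mod_eq_emod_of_pos (by norm_num)]; decide
  have f1 : PySem.Int.floordiv 3 2 = 1 := by
    rw [PySem.Int.floordiv_eq_ediv_of_pos (by norm_num)]; decide
  have m2 : PySem.Int.mod 10 10 = 0 := by
    rw [PySem.Int.mod_eq_emod_of_pos (by norm_num)]; decide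
  have f2 : PySem.Int.floordiv 10 10 = 1 := by
    rw [PySem.Int.floordiv_eq_ediv_of_pos (by norm_num)]; decide
  have m3 : PySem.Int.mod 1 2 = 1 := by
    rw [PySem.Int.mod_eq_emod_of_pos (by norm_num)]; decide
  have f3 : PySem.Int.floordiv 1 2 = 0 := by
    rw [PySem.Int.floordiv_eq_ediv_of_pos (by norm_num)]; decide
  have m4 : PySem.Int.mod 1 10 = 1 := by
    rw [PySem.Int.mod_eq_emod_of_pos (by norm_num)]; decide
  have f4 : PySem.Int.floordiv 1 10 = 0 := by
    rw [PySem.Int.floordiv_eq_ediv_of_pos (by norm_num)]; decide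
  rw [pvSelDigits, pvSelDigits, pvSelDigits]
  norm_num [m1, f1, m2, f2, m3, f3, m4, f4]

theorem hA : generuj_liczbe 10 3 = 1 := by
  rw [generuj_liczbe, pvLoop1_eq, hsel]
  have : pvValBE [0, 1] 0 = 1 := by simp [pvValBE]
  rw [this, pvLoop2, pvLoop2]
  norm_num [PySem.Int.mod_eq_emod_of_pos, PySem.Int.floordiv_eq_ediv_of_pos]

theorem hB : generuj_liczbe_alt 10 3 = 10 := by
  rw [generuj_liczbe_alt, pvLoopB_eq, hsel]
  simp [pvValLE]


-- ===== VERDICT =====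
theorem generuj_liczbe_spec : Claim_unchanged_generuj_liczbe := by
  intro n i dom hD
  have hn : n ≤ 2147483648 := by
    unfold Dom_generuj_liczbe pvDomInt at dom
    simp only [Bool.and_eq_true, decide_eq_true_eq] at dom
    exact dom.1.2
  exact pvMainEq n i (fun hc => hD ((pvD_iff n i hn).2 hc))

theorem generuj_liczbe_changed : Claim_changed_generuj_liczbe := by
  unfold Claim_changed_generuj_liczbe pvDiffWitness_generuj_liczbe pvDiffWitnessOut_generuj_liczbe
  refine ⟨by decide, ?_, hA, hB, by decide⟩
  unfold D_generuj_liczbe pvSel pvDigit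
  decide

theorem generuj_liczbe_tight : Claim_exact_generuj_liczbe := by
  intro n i dom hD
  have hn : n ≤ 2147483648 := by
    unfold Dom_generuj_liczbe pvDomInt at dom
    simp only [Bool.and_eq_true, decide_eq_true_eq] at dom
    exact dom.1.2
  exact pvMainNe n i ((pvD_iff n i hn).1 hD)
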